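-- pv_equiv track=rewrite | github.com/niksw7/CompetetiveProgramming | codejam/kickstart2018A/evendigits/evendigits.py | solve
-- ===== SOURCE A (Python) =====
-- def solve(n):
--     string_n = str(n)
--     for i, d in enumerate(string_n):
--         int_d = int(d)
--         if int_d % 2 != 0:
--             if d == '9':
--                 return n - int(string_n[:i] + str(int_d - 1) + '8' * (len(string_n) - i - 1))
--             next = string_n[:i] + str(int_d + 1) + '0' * (len(string_n) - i - 1)
--             prev = string_n[:i] + str(int_d - 1) + '8' * (len(string_n) - i - 1)
--             return min(int(next) - n, n - int(prev))
--     return 0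
-- ===== SOURCE B (Python) =====
-- def neighbor(s, step, fill):
--     """Build the nearest all-even-digit string on one side of s in a single
--     stateful character pass: copy even digits until the first odd one, shift
--     that digit by step, then pad with fill. None = no odd digit found, or the
--     shift would need a carry (digit overflow past 9)."""
--     out = ''
--     moved = False
--     for c in s:
--         if moved:
--             out += fill
--         elif int(c) % 2 == 1:
--             d = int(c) + step
--             if d > 9:
--                 return None
--             out += str(d)
--             moved = True
--         else:
--             out += c
--     if not moved:
--         return None
--     return int(out)
--
--
-- def solve(n):
--     s = str(n)
--     down = neighbor(s, -1, '8')
--     if down is None:          # every digit already even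
--         return 0
--     up = neighbor(s, 1, '0')
--     if up is None:            # rounding up would need a carry: down wins
--         return n - down
--     return min(up - n, n - down)
-- ===== Notes on version B (the rewrite author's own statement) =====
-- stated objective: alternative
-- what changed: B replaces A's indexed scan with slice+str+repeat candidate splicing by a reusable single-pass character-fold helper that constructs each all-even neighbour string (copy evens, shift the first odd digit, pad), run once downward and once upward with carry signalled by None.
import Mathlib
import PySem

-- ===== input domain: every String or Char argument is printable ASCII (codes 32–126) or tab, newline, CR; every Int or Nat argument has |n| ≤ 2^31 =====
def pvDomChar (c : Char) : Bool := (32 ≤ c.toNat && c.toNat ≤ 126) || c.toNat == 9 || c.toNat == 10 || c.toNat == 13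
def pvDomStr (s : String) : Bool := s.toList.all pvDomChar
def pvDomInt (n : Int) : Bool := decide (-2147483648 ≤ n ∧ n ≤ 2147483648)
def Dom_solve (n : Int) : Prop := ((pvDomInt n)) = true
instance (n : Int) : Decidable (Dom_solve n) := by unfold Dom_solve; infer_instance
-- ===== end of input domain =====

-- B rebuilds the two all-even neighbour strings by a single stateful character pass (one helper
-- run downward and upward, carry signalled by None) instead of A's indexed scan that splices
-- slice + str + repeat candidates (objective: alternative).

-- ===== PORT A =====
-- the for-loop over enumerate(string_n) with its early returns
def solveGo (n : Int) (s : List Char) : List (Int × Char) → Int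
  | [] => 0
  | (i, d) :: rest =>
    let int_d : Int := (PySem.Int.ofChars? [d]).getD 0   -- int(d); under Pre_solve every char is a digit, so never none
    if PySem.Int.mod int_d 2 ≠ 0 then
      if d = '9' then
        n - (PySem.Int.ofChars? (PySem.List.slice s none (some i) ++ PySem.Int.toChars (int_d - 1) ++ List.replicate (PySem.List.len s - i - 1).toNat '8')).getD 0
      else
        let next := PySem.List.slice s none (some i) ++ PySem.Int.toChars (int_d + 1) ++ List.replicate (PySem.List.len s - i - 1).toNat '0'
        let prev := PySem.List.slice s none (some i) ++ PySem.Int.toChars (int_d - 1) ++ List.replicate (PySem.List.len s - i - 1).toNat '8'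
        min ((PySem.Int.ofChars? next).getD 0 - n) (n - (PySem.Int.ofChars? prev).getD 0)
    else solveGo n s rest

def solve (n : Int) : Int :=
  let string_n := PySem.Int.toChars n
  solveGo n string_n (PySem.List.enumerate string_n 0)

-- ===== PORT B =====
-- the 'for c in s' loop of neighbor, state = (out, moved); none = the early 'return None' (carry)
def neighborLoop (step : Int) (fill : Char) : List Char → List Char → Bool → Option (List Char × Bool)
  | [], out, moved => some (out, moved)
  | c :: rest, out, moved =>
    if moved then neighborLoop step fill rest (out ++ [fill]) moved
    else if PySem.Int.mod ((PySem.Int.ofChars? [c]).getD 0) 2 = 1 then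
      -- int(c); under Pre_solve every char is a digit, so ofChars? is never none
      let d := (PySem.Int.ofChars? [c]).getD 0 + step
      if d > 9 then none
      else neighborLoop step fill rest (out ++ PySem.Int.toChars d) true
    else neighborLoop step fill rest (out ++ [c]) moved

-- neighbor(s, step, fill): the final 'if not moved: return None / return int(out)'
def neighborAlt (s : List Char) (step : Int) (fill : Char) : Option Int :=
  match neighborLoop step fill s [] false with
  | none => none
  | some (out, moved) => if moved = false then none else some ((PySem.Int.ofChars? out).getD 0)

-- body of solve once s = str(n) is fixed
def altBody (n : Int) (s : List Char) : Int :=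
  match neighborAlt s (-1) '8' with
  | none => 0
  | some dn =>
    match neighborAlt s 1 '0' with
    | none => n - dn
    | some up => min (up - n) (n - dn)

def solve_alt (n : Int) : Int := altBody n (PySem.Int.toChars n)

-- ===== PRECONDITION & SPEC =====
-- Pre_ excludes n < 0, where A raises ValueError (int('-') on the sign character); B raises there too.
def Pre_solve (n : Int) : Prop := 0 ≤ n
instance (n : Int) : Decidable (Pre_solve n) := by unfold Pre_solve; infer_instance
def pvWitness_solve : Int := 35
def Spec_solve (n : Int) (out : Int) : Prop := out = solve_alt n
instance (n : Int) (out : Int) : Decidable (Spec_solve n out) := by unfold Spec_solve; infer_instance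

-- ===== CLAIM (what is proved, stated in full; the proofs are below) =====
def Claim_equal_solve : Prop := ∀ (n : Int), Dom_solve n → Pre_solve n → Spec_solve n (solve n)

-- ===== LEMMAS AND PROOFS =====

theorem digitChar_isDigit (m : Nat) (h : m < 10) : (Nat.digitChar m).isDigit = true := by
  interval_cases m <;> decide

theorem toDigitsCore_digits (f : Nat) : ∀ (n : Nat) (acc : List Char),
    (∀ c ∈ acc, c.isDigit = true) → ∀ c ∈ Nat.toDigitsCore 10 f n acc, c.isDigit = true := by
  induction f with
  | zero => intro n acc hacc; simpa [Nat.toDigitsCore] using hacc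
  | succ f ih =>
    intro n acc hacc c hc
    rw [Nat.toDigitsCore] at hc
    by_cases h0 : n / 10 = 0
    · simp only [h0] at hc
      rcases List.mem_cons.mp hc with h | h
      · subst h; exact digitChar_isDigit _ (Nat.mod_lt _ (by norm_num))
      · exact hacc _ h
    · simp only [if_neg h0] at hc
      exact ih _ _ (by
        intro x hx
        rcases List.mem_cons.mp hx with h | h
        · subst h; exact digitChar_isDigit _ (Nat.mod_lt _ (by norm_num))
        · exact hacc _ h) _ hc

theorem toChars_digits (n : Int) (h : 0 ≤ n) : ∀ c ∈ PySem.Int.toChars n, c.isDigit = true := by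
  intro c hc
  rw [PySem.Int.toChars, if_neg (by omega)] at hc
  exact toDigitsCore_digits _ _ _ (by simp) _ hc

theorem digit_mem (c : Char) (h : c.isDigit = true) :
    c ∈ (['0','1','2','3','4','5','6','7','8','9'] : List Char) := by
  have h1 : 48 ≤ c.toNat ∧ c.toNat ≤ 57 := by
    simp [Char.isDigit, UInt32.le_iff_toNat_le] at h
    exact ⟨h.1, h.2⟩
  obtain ⟨hl, hu⟩ := h1
  have hc := Char.ofNat_toNat c
  interval_cases hm : c.toNat <;> · rw [← hc]; decide

-- once moved, the loop just appends fill for every remaining character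
theorem nbLoop_moved (step : Int) (fill : Char) : ∀ (rest out : List Char),
    neighborLoop step fill rest out true = some (out ++ List.replicate rest.length fill, true) := by
  intro rest
  induction rest with
  | nil => intro out; simp [neighborLoop]
  | cons c t ih =>
    intro out
    rw [neighborLoop, if_pos rfl, ih]
    simp only [List.length_cons, List.append_assoc, List.singleton_append]
    rw [← List.replicate_succ]

-- an all-even prefix is copied verbatim with moved still false
theorem nbLoop_even_prefix (step : Int) (fill : Char) : ∀ (pre : List Char),
    (∀ c ∈ pre, (['0','2','4','6','8'] : List Char).contains c = true) →
    ∀ (suf out : List Char),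
    neighborLoop step fill (pre ++ suf) out false = neighborLoop step fill suf (out ++ pre) false := by
  intro pre
  induction pre with
  | nil => intro _ suf out; simp
  | cons c t ih =>
    intro hev suf out
    have hc : (['0','2','4','6','8'] : List Char).contains c = true := hev c (by simp)
    have hm : c ∈ (['0','2','4','6','8'] : List Char) := by simpa using hc
    have hodd : ¬ PySem.Int.mod ((PySem.Int.ofChars? [c]).getD 0) 2 = 1 := by
      fin_cases hm <;> decide
    rw [List.cons_append, neighborLoop, if_neg (by simp), if_neg hodd,
      ih (fun x hx => hev x (by simp [hx])) suf (out ++ [c])]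
    simp [List.append_assoc]

theorem nbAlt_odd (pre rest : List Char) (c : Char) (d step : Int) (fill : Char)
    (hv : PySem.Int.ofChars? [c] = some d)
    (hmodB : PySem.Int.mod d 2 = 1)
    (hev : ∀ x ∈ pre, (['0','2','4','6','8'] : List Char).contains x = true) :
    neighborAlt (pre ++ c :: rest) step fill
      = if d + step > 9 then none
        else some ((PySem.Int.ofChars? (pre ++ PySem.Int.toChars (d + step) ++ List.replicate rest.length fill)).getD 0) := by
  rw [neighborAlt, nbLoop_even_prefix step fill pre hev (c :: rest) [],
    neighborLoop, if_neg (by simp), if_pos (by rw [hv]; simpa using hmodB)]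
  simp only [hv, Option.getD_some]
  by_cases hb : d + step > 9
  · rw [if_pos hb, if_pos hb]
  · rw [if_neg hb, if_neg hb, nbLoop_moved]
    simp [List.append_assoc]

theorem odd_case (pre rest : List Char) (n : Int) (c : Char) (d : Int)
    (hv : PySem.Int.ofChars? [c] = some d)
    (hmodA : PySem.Int.mod d 2 ≠ 0)
    (hmodB : PySem.Int.mod d 2 = 1)
    (h9 : (c = '9') ↔ (d = 9))
    (hdle : d ≤ 9)
    (hev : ∀ x ∈ pre, (['0','2','4','6','8'] : List Char).contains x = true) :
    solveGo n (pre ++ c :: rest) (((pre.length : Int), c) :: PySem.List.enumerate rest ((pre.length : Int) + 1))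
      = altBody n (pre ++ c :: rest) := by
  have hslice : PySem.List.slice (pre ++ c :: rest) none (some (pre.length : Int)) = pre := by
    rw [PySem.List.slice_to_natCast, List.take_left]
  have hrep : (PySem.List.len (pre ++ c :: rest) - (pre.length : Int) - 1).toNat = rest.length := by
    simp [PySem.List.len_eq]
  have hdown := nbAlt_odd pre rest c d (-1) '8' hv hmodB hev
  have hup := nbAlt_odd pre rest c d 1 '0' hv hmodB hev
  rw [if_neg (by omega)] at hdown
  simp only [solveGo, hv, Option.getD_some, if_pos hmodA, hslice, hrep]
  rw [show d - 1 = d + (-1) by ring]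
  by_cases hc9 : c = '9'
  · have hd9 : d = 9 := h9.mp hc9
    rw [if_pos (by omega : d + 1 > 9)] at hup
    rw [if_pos hc9, altBody, hdown, hup]
  · have hd : ¬ d = 9 := fun h => hc9 (h9.mpr h)
    rw [if_neg (by omega)] at hup
    rw [if_neg hc9, altBody, hdown, hup]

theorem even_case (pre rest : List Char) (n : Int) (c : Char) (d : Int)
    (hv : PySem.Int.ofChars? [c] = some d)
    (hmod : ¬ PySem.Int.mod d 2 ≠ 0)
    (hrec : solveGo n ((pre ++ [c]) ++ rest) (PySem.List.enumerate rest ((((pre ++ [c]).length : Nat) : Int))) = altBody n ((pre ++ [c]) ++ rest)) :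
    solveGo n (pre ++ c :: rest) (((pre.length : Int), c) :: PySem.List.enumerate rest ((pre.length : Int) + 1))
      = altBody n (pre ++ c :: rest) := by
  have e1 : (pre ++ [c]) ++ rest = pre ++ c :: rest := by simp
  have e2 : (((pre ++ [c]).length : Nat) : Int) = (pre.length : Int) + 1 := by
    simp only [List.length_append, List.length_singleton]; push_cast; omega
  rw [e1, e2] at hrec
  simp only [solveGo, hv, Option.getD_some, if_neg hmod]
  exact hrec

theorem main_lemma (suf : List Char) : ∀ (pre : List Char) (n : Int),
    (∀ c ∈ pre ++ suf, c.isDigit = true) →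
    (∀ c ∈ pre, (['0','2','4','6','8'] : List Char).contains c = true) →
    solveGo n (pre ++ suf) (PySem.List.enumerate suf (pre.length : Int)) = altBody n (pre ++ suf) := by
  induction suf with
  | nil =>
    intro pre n hdig hev
    rw [List.append_nil]
    have hB : altBody n pre = 0 := by
      rw [altBody, neighborAlt]
      rw [show pre = pre ++ ([] : List Char) by simp] at hev ⊢
      rw [nbLoop_even_prefix (-1) '8' pre (by simpa using hev) [] []]
      simp [neighborLoop]
    rw [hB]
    simp [solveGo, PySem.List.enumerate]
  | cons c rest ih =>
    intro pre n hdig hev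
    have hc := digit_mem c (hdig c (by simp))
    rw [PySem.List.enumerate_cons]
    have hdig' : ∀ x ∈ (pre ++ [c]) ++ rest, x.isDigit = true := by
      intro x hx; apply hdig; simp at hx ⊢; tauto
    have hev' : c ∈ (['0','2','4','6','8'] : List Char) →
        ∀ x ∈ pre ++ [c], (['0','2','4','6','8'] : List Char).contains x = true := by
      intro hcin x hx
      rcases List.mem_append.mp hx with h | h
      · exact hev x h
      · simp only [List.mem_singleton] at h; subst h; simpa using hcin
    fin_cases hc
    · exact even_case pre rest n '0' 0 (by decide) (by decide) (ih (pre ++ ['0']) n hdig' (hev' (by decide)))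
    · exact odd_case pre rest n '1' 1 (by decide) (by decide) (by decide) (by decide) (by decide) hev
    · exact even_case pre rest n '2' 2 (by decide) (by decide) (ih (pre ++ ['2']) n hdig' (hev' (by decide)))
    · exact odd_case pre rest n '3' 3 (by decide) (by decide) (by decide) (by decide) (by decide) hev
    · exact even_case pre rest n '4' 4 (by decide) (by decide) (ih (pre ++ ['4']) n hdig' (hev' (by decide)))
    · exact odd_case pre rest n '5' 5 (by decide) (by decide) (by decide) (by decide) (by decide) hev
    · exact even_case pre rest n '6' 6 (by decide) (by decide) (ih (pre ++ ['6']) n hdig' (hev' (by decide)))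
    · exact odd_case pre rest n '7' 7 (by decide) (by decide) (by decide) (by decide) (by decide) hev
    · exact even_case pre rest n '8' 8 (by decide) (by decide) (ih (pre ++ ['8']) n hdig' (hev' (by decide)))
    · exact odd_case pre rest n '9' 9 (by decide) (by decide) (by decide) (by decide) (by decide) hev

-- ===== VERDICT (by name: the statement is the Claim_ definition above) =====
theorem solve_spec : Claim_equal_solve := by
  intro n _ hP
  unfold Spec_solve
  have h := main_lemma (PySem.Int.toChars n) [] n
    (by simpa using toChars_digits n hP) (by simp)
  simpa [solve, solve_alt] using h
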